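-- pv_equiv track=rewrite | github.com/bracerino/GUI-point-defects | helpers_defects.py | get_laue_group
-- ===== SOURCE A (Python) =====
-- def get_laue_group(space_group_number):
--     laue_groups = {
--         # Triclinic
--         range(1, 3): "-1",
--         # Monoclinic
--         range(3, 16): "2/m",
--         # Orthorhombic
--         range(16, 75): "mmm",
--         # Tetragonal
--         range(75, 89): "4/m",
--         range(89, 143): "4/mmm",
--         # Trigonal
--         range(143, 149): "-3",
--         range(149, 168): "-3m",
--         # Hexagonal
--         range(168, 177): "6/m",
--         range(177, 195): "6/mmm",
--         # Cubic
--         range(195, 207): "m-3",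
--         range(207, 231): "m-3m"
--     }
--
--     for sg_range, laue in laue_groups.items():
--         if space_group_number in sg_range:
--             return laue
--     return "Unknown"
-- ===== SOURCE B (Python) =====
-- _LAUE_BOUNDS = (3, 16, 75, 89, 143, 149, 168, 177, 195, 207)
-- _LAUE_LABELS = ("-1", "2/m", "mmm", "4/m", "4/mmm", "-3", "-3m",
--                 "6/m", "6/mmm", "m-3", "m-3m")
--
--
-- def get_laue_group(space_group_number):
--     if space_group_number < 1 or space_group_number > 230:
--         return "Unknown"
--     # binary search: count of boundaries <= space_group_number
--     lo, hi = 0, len(_LAUE_BOUNDS)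
--     while lo < hi:
--         mid = (lo + hi) // 2
--         if _LAUE_BOUNDS[mid] <= space_group_number:
--             lo = mid + 1
--         else:
--             hi = mid
--     return _LAUE_LABELS[lo]
-- ===== Notes on version B (the rewrite author's own statement) =====
-- stated objective: alternative
-- what changed: Replaces the linear scan over a dict of ranges with a range check plus a binary search over the sorted segment boundaries, indexing into a label tuple.
import Mathlib
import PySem

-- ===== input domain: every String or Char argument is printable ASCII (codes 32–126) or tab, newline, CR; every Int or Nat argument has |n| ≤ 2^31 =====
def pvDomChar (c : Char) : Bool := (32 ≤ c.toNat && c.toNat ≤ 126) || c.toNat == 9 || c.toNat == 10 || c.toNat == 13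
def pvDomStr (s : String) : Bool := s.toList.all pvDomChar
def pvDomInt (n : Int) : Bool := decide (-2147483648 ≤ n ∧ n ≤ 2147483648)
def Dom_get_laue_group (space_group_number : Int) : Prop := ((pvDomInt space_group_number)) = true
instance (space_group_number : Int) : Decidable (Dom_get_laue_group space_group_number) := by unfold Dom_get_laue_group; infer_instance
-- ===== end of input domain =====

-- B replaces A's linear scan over a dict of ranges with a range check plus a binary search
-- over the sorted segment boundaries (objective: alternative).


-- ===== PORT A =====
-- A's dict literal: keys are ranges, values the Laue labels (insertion order).
def lauePairs : List ((Int × Int) × String) :=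
  [((1, 3), "-1"), ((3, 16), "2/m"), ((16, 75), "mmm"), ((75, 89), "4/m"),
   ((89, 143), "4/mmm"), ((143, 149), "-3"), ((149, 168), "-3m"),
   ((168, 177), "6/m"), ((177, 195), "6/mmm"), ((195, 207), "m-3"),
   ((207, 231), "m-3m")]

-- A's for-loop with early return; 'n in range(a,b)' is a ≤ n ∧ n < b.
def laueLoop (n : Int) : List ((Int × Int) × String) → String
  | [] => "Unknown"
  | ((a, b), l) :: rest => if a ≤ n ∧ n < b then l else laueLoop n rest

def get_laue_group (space_group_number : Int) : String :=
  laueLoop space_group_number lauePairs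

-- ===== PORT B =====
def laueBounds : List Int := [3, 16, 75, 89, 143, 149, 168, 177, 195, 207]
def laueLabels : List String :=
  ["-1", "2/m", "mmm", "4/m", "4/mmm", "-3", "-3m", "6/m", "6/mmm", "m-3", "m-3m"]

-- B's while loop, with fuel = hi - lo iterations (the loop halves hi - lo each step,
-- so laueBounds.length fuel suffices). Indexing is always in range (0 ≤ mid < 10).
def laueSearch (n : Int) : Nat → Nat → Nat → Nat
  | 0, lo, _ => lo
  | fuel + 1, lo, hi =>
    if lo < hi then
      let mid := (lo + hi) / 2
      if laueBounds.getD mid 0 ≤ n then laueSearch n fuel (mid + 1) hi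
      else laueSearch n fuel lo mid
    else lo

def get_laue_group_alt (space_group_number : Int) : String :=
  if space_group_number < 1 ∨ space_group_number > 230 then "Unknown"
  else laueLabels.getD (laueSearch space_group_number laueBounds.length 0 laueBounds.length) ""

-- ===== PRECONDITION & SPEC =====
def Spec_get_laue_group (space_group_number : Int) (out : String) : Prop := out = get_laue_group_alt space_group_number
instance (space_group_number : Int) (out : String) : Decidable (Spec_get_laue_group space_group_number out) := by unfold Spec_get_laue_group; infer_instance

-- ===== CLAIM (what is proved, stated in full; the proofs are below) =====
def Claim_equal_get_laue_group : Prop := ∀ (space_group_number : Int), Dom_get_laue_group space_group_number → Spec_get_laue_group space_group_number (get_laue_group space_group_number)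

-- ===== LEMMAS AND PROOFS =====
theorem laueLoop_none (n : Int) (ps : List ((Int × Int) × String))
    (h : ∀ p ∈ ps, ¬(p.1.1 ≤ n ∧ n < p.1.2)) : laueLoop n ps = "Unknown" := by
  induction ps with
  | nil => rfl
  | cons p rest ih =>
    obtain ⟨⟨a, b⟩, l⟩ := p
    rw [laueLoop, if_neg (h _ (List.mem_cons_self ..))]
    exact ih (fun q hq => h q (List.mem_cons_of_mem _ hq))

theorem get_laue_group_out (n : Int) (h : n < 1 ∨ n > 230) :
    get_laue_group n = get_laue_group_alt n := by
  have hA : get_laue_group n = "Unknown" := by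
    unfold get_laue_group
    apply laueLoop_none
    intro p hp
    fin_cases hp <;> simp <;> omega
  have hB : get_laue_group_alt n = "Unknown" := by
    rw [get_laue_group_alt, if_pos (by omega)]
  rw [hA, hB]

-- ===== VERDICT (by name: the statement is the Claim_ definition above) =====
theorem get_laue_group_spec : Claim_equal_get_laue_group := by
  intro n _
  unfold Spec_get_laue_group
  by_cases h : 1 ≤ n ∧ n ≤ 230
  · obtain ⟨h1, h2⟩ := h
    interval_cases n <;> decide
  · exact get_laue_group_out n (by omega)
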